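-- pv_equiv track=rewrite | github.com/HoeYeon/Algorithm | Coding_Test/Coopang/2.py | check
-- ===== SOURCE A (Python) =====
-- def check(fin,M,T,K):
--     result = 0
--     for i in fin:
--         ch = True
--         for j in range(len(i)-T+1):
--             if sum(i[j:j+T]) > K:
--                 ch = False
--                 break
--         if ch and sum(i) == M:
--             result += 1
--     return result
-- ===== SOURCE B (Python) =====
-- def check(fin, M, T, K):
--     result = 0
--     for row in fin:
--         # prefix sums: P[j] = sum of the first j elements
--         s = 0
--         P = [0]
--         for x in row:
--             s += x
--             P.append(s)
--         # window sum starting at j is P[j+T] - P[j]; zip pairs them up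
--         if all(b - a <= K for a, b in zip(P, P[T:])) and s == M:
--             result += 1
--     return result
-- ===== Notes on version B (the rewrite author's own statement) =====
-- stated objective: alternative
-- what changed: B builds a prefix-sum list once per row and tests each T-window as a difference of two prefix sums (zip of the prefix list with its T-shifted self), replacing A's per-window slice-and-sum rescan; Pre_ excludes negative T, where A's slice i[j:j+T] gets a negative stop and wraps around via Python negative indexing.
-- outside the precondition, e.g. on check([[1]], 1, -1, 0): A returns 1, B returns 0
import Mathlib
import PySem

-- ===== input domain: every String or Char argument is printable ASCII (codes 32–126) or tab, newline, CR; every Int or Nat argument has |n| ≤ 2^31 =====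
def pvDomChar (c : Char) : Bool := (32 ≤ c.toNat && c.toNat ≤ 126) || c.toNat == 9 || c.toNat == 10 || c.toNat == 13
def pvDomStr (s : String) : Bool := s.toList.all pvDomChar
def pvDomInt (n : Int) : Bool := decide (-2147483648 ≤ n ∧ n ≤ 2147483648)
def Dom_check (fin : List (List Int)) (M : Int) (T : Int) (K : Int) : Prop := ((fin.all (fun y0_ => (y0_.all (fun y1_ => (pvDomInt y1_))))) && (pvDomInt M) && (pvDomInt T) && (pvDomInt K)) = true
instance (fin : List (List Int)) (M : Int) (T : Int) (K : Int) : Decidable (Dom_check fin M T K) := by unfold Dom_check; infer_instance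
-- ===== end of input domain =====

-- B tests windows as differences of a once-built per-row prefix-sum list instead of A's per-window slice-and-sum rescan (alternative algorithm).

-- ===== PORT A =====
-- inner 'for j in range(len(i)-T+1): if sum(i[j:j+T]) > K: ch = False; break'
def checkGoA (i : List Int) (T K : Int) : List Int → Bool
  | [] => true
  | j :: rest =>
    if (PySem.List.slice i (some j) (some (j + T))).sum > K then false
    else checkGoA i T K rest

def check (fin : List (List Int)) (M : Int) (T : Int) (K : Int) : Int :=
  fin.foldl (fun result i =>
    let ch := checkGoA i T K (PySem.List.pyRange 0 ((i.length : Int) - T + 1) 1)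
    if ch && (i.sum == M) then result + 1 else result) 0

-- ===== PORT B =====
def check_alt (fin : List (List Int)) (M : Int) (T : Int) (K : Int) : Int :=
  fin.foldl (fun result row =>
    -- 's = 0; P = [0]; for x in row: s += x; P.append(s)'
    let ps := row.foldl (fun (q : List Int × Int) x => (q.1 ++ [q.2 + x], q.2 + x)) ([0], 0)
    -- 'all(b - a <= K for a, b in zip(P, P[T:])) and s == M'
    if (ps.1.zip (PySem.List.slice ps.1 (some T) none)).all
          (fun ab => decide (ab.2 - ab.1 ≤ K)) && (ps.2 == M)
    then result + 1 else result) 0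

-- ===== PRECONDITION & SPEC =====
-- Pre_ excludes negative T (a window length): there A's slice i[j:j+T] has a negative
-- stop and wraps around via Python negative indexing, an artefact of slice semantics
-- outside the task's natural domain; B's prefix-list shift reads such windows differently.
def Pre_check (fin : List (List Int)) (M : Int) (T : Int) (K : Int) : Prop := 0 ≤ T
instance (fin : List (List Int)) (M : Int) (T : Int) (K : Int) : Decidable (Pre_check fin M T K) := by unfold Pre_check; infer_instance
def pvWitness_check : List (List Int) × Int × Int × Int := ([[1, 2], [3]], 3, 1, 5)
def Spec_check (fin : List (List Int)) (M : Int) (T : Int) (K : Int) (out : Int) : Prop := out = check_alt fin M T K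
instance (fin : List (List Int)) (M : Int) (T : Int) (K : Int) (out : Int) : Decidable (Spec_check fin M T K out) := by unfold Spec_check; infer_instance

-- ===== CLAIM (what is proved, stated in full; the proofs are below) =====
def Claim_equal_check : Prop := ∀ (fin : List (List Int)) (M : Int) (T : Int) (K : Int), Dom_check fin M T K → Pre_check fin M T K → Spec_check fin M T K (check fin M T K)

-- ===== LEMMAS AND PROOFS =====

-- the prefix-sum list B's row loop builds
def pfx (i : List Int) : List Int := (List.range (i.length + 1)).map (fun m => ((i.take m).sum : Int))

theorem foldlP_gen (i : List Int) : ∀ (P0 : List Int) (s0 : Int),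
    i.foldl (fun (q : List Int × Int) x => (q.1 ++ [q.2 + x], q.2 + x)) (P0 ++ [s0], s0)
      = (P0 ++ (List.range (i.length + 1)).map (fun m => s0 + (i.take m).sum), s0 + i.sum) := by
  induction i with
  | nil => intro P0 s0; simp
  | cons x xs ih =>
    intro P0 s0
    simp only [List.foldl_cons]
    rw [show (P0 ++ [s0] ++ [s0 + x], s0 + x) = ((P0 ++ [s0]) ++ [s0 + x], s0 + x) by simp,
        ih (P0 ++ [s0]) (s0 + x)]
    simp only [Prod.mk.injEq]
    refine ⟨?_, ?_⟩
    · simp only [List.length_cons, List.range_succ_eq_map, List.map_cons, List.map_map]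
      simp [Function.comp, add_assoc, List.append_assoc]
    · simp [add_assoc]

theorem foldlP (i : List Int) :
    i.foldl (fun (q : List Int × Int) x => (q.1 ++ [q.2 + x], q.2 + x)) ([0], 0)
      = (pfx i, i.sum) := by
  have := foldlP_gen i [] 0
  simpa [pfx] using this

theorem goA_eq_all (i : List Int) (T K : Int) (l : List Int) :
    checkGoA i T K l
      = l.all (fun j => decide ((PySem.List.slice i (some j) (some (j + T))).sum ≤ K)) := by
  induction l with
  | nil => rfl
  | cons j rest ih =>
    by_cases h : (PySem.List.slice i (some j) (some (j + T))).sum > K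
    · simp [checkGoA, h, not_le.mpr h]
    · simp [checkGoA, h, not_lt.mp h, ih]

theorem pfx_getD (i : List Int) (m : Nat) (hm : m < i.length + 1) :
    (pfx i).getD m 0 = (i.take m).sum := by
  rw [pfx, List.getD_eq_getElem _ _ (by simpa using hm)]
  simp

theorem drop_take_sum (i : List Int) (k t : Nat) :
    ((i.drop k).take t).sum = (i.take (k + t)).sum - (i.take k).sum := by
  have h : i.take (k + t) = i.take k ++ (i.drop k).take t := List.take_add
  have := congrArg List.sum h
  simp only [List.sum_append] at this
  omega

theorem zip_drop_map (P : List Int) (t : Nat) :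
    P.zip (P.drop t) = (List.range (P.length - t)).map (fun k => (P.getD k 0, P.getD (k + t) 0)) := by
  apply List.ext_getElem
  · simp
  · intro k h1 h2
    have hk : k < P.length - t := by simpa using h2
    have hk1 : k < P.length := by omega
    have hk2 : k + t < P.length := by omega
    simp only [List.getElem_map, List.getElem_range, List.getElem_zip, List.getElem_drop]
    rw [List.getD_eq_getElem P 0 hk1, List.getD_eq_getElem P 0 hk2]
    simp [show t + k = k + t from Nat.add_comm t k]

theorem cond_eq (i : List Int) (T K : Int) (hT : 0 ≤ T) :
    checkGoA i T K (PySem.List.pyRange 0 ((i.length : Int) - T + 1) 1)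
      = ((pfx i).zip (PySem.List.slice (pfx i) (some T) none)).all
          (fun ab => decide (ab.2 - ab.1 ≤ K)) := by
  obtain ⟨t, rfl⟩ : ∃ t : Nat, T = (t : Int) := ⟨T.toNat, (Int.toNat_of_nonneg hT).symm⟩
  rw [goA_eq_all, PySem.List.pyRange_one]
  have hrange : (((i.length : Int) - (t : Int) + 1) - 0).toNat = i.length + 1 - t := by omega
  rw [hrange, List.all_map]
  have hlenpfx : (pfx i).length = i.length + 1 := by simp [pfx]
  have key : ∀ k : Nat, k < i.length + 1 - t →
      (PySem.List.slice i (some (k : Int)) (some ((k : Int) + (t : Int)))).sum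
        = (pfx i).getD (k + t) 0 - (pfx i).getD k 0 := by
    intro k hk
    rw [PySem.List.slice_natCast_add, drop_take_sum,
        pfx_getD i (k + t) (by omega), pfx_getD i k (by omega)]
  rw [PySem.List.slice_from_natCast, zip_drop_map, List.all_map, hlenpfx, Bool.eq_iff_iff]
  simp only [List.all_eq_true, Function.comp, decide_eq_true_eq, zero_add, List.mem_range]
  constructor
  · intro h k hk
    have hx := h k hk
    rw [key k hk] at hx
    simpa using hx
  · intro h k hk
    have hx := h k hk
    rw [key k hk]
    simpa using hx

-- ===== VERDICT (by name: the statement is the Claim_ definition above) =====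
theorem check_spec : Claim_equal_check := by
  intro fin M T K _ hT
  unfold Spec_check check check_alt
  have hstep : (fun (result : Int) (i : List Int) =>
      let ch := checkGoA i T K (PySem.List.pyRange 0 ((i.length : Int) - T + 1) 1)
      if ch && (i.sum == M) then result + 1 else result)
    = (fun (result : Int) (row : List Int) =>
      let ps := row.foldl (fun (q : List Int × Int) x => (q.1 ++ [q.2 + x], q.2 + x)) ([0], 0)
      if (ps.1.zip (PySem.List.slice ps.1 (some T) none)).all
            (fun ab => decide (ab.2 - ab.1 ≤ K)) && (ps.2 == M)
      then result + 1 else result) := by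
    funext result i
    simp only [foldlP i, cond_eq i T K hT]
  rw [hstep]
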